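-- pv_equiv track=rewrite | github.com/nathanielknight/aoc-2022 | 12/solve.py | make_neighbors
-- ===== SOURCE A (Python) =====
-- import typing as ty
--
-- Point = ty.Tuple[int, int]
--
-- def neighbor_points(p: Point) -> ty.Iterable[Point]:
--     (x, y) = p
--     yield (x + 1, y)
--     yield (x - 1, y)
--     yield (x, y + 1)
--     yield (x, y - 1)
--
-- def make_neighbors(heights: ty.Dict[Point, int]) -> ty.Dict[Point, ty.Set[Point]]:
--     neighbors = {p: set() for p in heights}
--     for p, p_height in heights.items():
--         for n in neighbor_points(p):
--             if (n_height := heights.get(n)) is not None: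
--                 if n_height <= p_height + 1:
--                     neighbors[p].add(n)
--     return neighbors
-- ===== SOURCE B (Python) =====
-- import typing as ty
--
-- Point = ty.Tuple[int, int]
--
-- def _scan_edges(heights: "ty.Dict[Point, int]"):
--     # Visit each undirected grid adjacency exactly once (probe only the right
--     # and up neighbour of every point) and record BOTH directed edges it
--     # induces, keyed by their source point, in four direction tables.
--     right: ty.Dict[Point, Point] = {}
--     left: ty.Dict[Point, Point] = {}
--     up: ty.Dict[Point, Point] = {}
--     down: ty.Dict[Point, Point] = {}
--     for (x, y), h in heights.items():
--         hn = heights.get((x + 1, y))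
--         if hn is not None:
--             if hn <= h + 1:
--                 right[(x, y)] = (x + 1, y)
--             if h <= hn + 1:
--                 left[(x + 1, y)] = (x, y)
--         hn = heights.get((x, y + 1))
--         if hn is not None:
--             if hn <= h + 1:
--                 up[(x, y)] = (x, y + 1)
--             if h <= hn + 1:
--                 down[(x, y + 1)] = (x, y)
--     return right, left, up, down
--
-- def make_neighbors(heights: "ty.Dict[Point, int]") -> "ty.Dict[Point, ty.Set[Point]]":
--     right, left, up, down = _scan_edges(heights)
--     result: ty.Dict[Point, ty.Set[Point]] = {}
--     for p in heights:
--         s = set()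
--         for d in (right, left, up, down):
--             n = d.get(p)
--             if n is not None:
--                 s.add(n)
--         result[p] = s
--     return result
-- ===== Notes on version B (the rewrite author's own statement) =====
-- stated objective: alternative
-- what changed: B visits each undirected grid adjacency exactly once (probing only the right and up neighbour of every point), records both directed edges it induces in four direction tables, and then assembles each point's neighbour set from those tables in a second pass, instead of A's four neighbour probes per point.
import Mathlib
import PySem

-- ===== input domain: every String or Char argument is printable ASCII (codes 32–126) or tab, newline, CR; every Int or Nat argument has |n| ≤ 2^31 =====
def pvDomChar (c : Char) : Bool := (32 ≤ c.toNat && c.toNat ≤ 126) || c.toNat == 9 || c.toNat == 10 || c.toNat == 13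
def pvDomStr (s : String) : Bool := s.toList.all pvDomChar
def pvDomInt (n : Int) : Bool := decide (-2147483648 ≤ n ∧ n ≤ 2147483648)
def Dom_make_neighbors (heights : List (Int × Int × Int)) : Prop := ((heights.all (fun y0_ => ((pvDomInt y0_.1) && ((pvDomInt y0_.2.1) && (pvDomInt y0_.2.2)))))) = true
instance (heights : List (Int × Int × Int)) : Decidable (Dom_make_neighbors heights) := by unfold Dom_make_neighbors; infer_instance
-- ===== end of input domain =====

-- B visits each undirected grid adjacency once (probing only the right and up neighbour of every
-- point), records both directed edges in four direction tables, and assembles the per-point sets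
-- in a second pass — instead of A's four neighbour probes per point (alternative, not faster).

-- ===== PORT A =====
-- the input dict as an association list, lookup = first match (keys unique under Pre_)
def hget : List (Int × Int × Int) → (Int × Int) → Option Int
  | [], _ => none
  | e :: t, q => if (e.1, e.2.1) = q then some e.2.2 else hget t q

-- {p: set() for p in heights} : dict comprehension (overwrite keeps position; new keys append)
def dinsert : List (Int × Int × List (Int × Int)) → (Int × Int) → List (Int × Int × List (Int × Int))
  | [], q => [(q.1, q.2, [])]
  | e :: t, q => if (e.1, e.2.1) = q then (e.1, e.2.1, []) :: t else e :: dinsert t q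

def dictInit (heights : List (Int × Int × Int)) : List (Int × Int × List (Int × Int)) :=
  heights.foldl (fun d e => dinsert d (e.1, e.2.1)) []

-- neighbors[p].add(n) : update the set stored at key p (key always present here)
def modifyAdd : List (Int × Int × List (Int × Int)) → (Int × Int) → (Int × Int) → List (Int × Int × List (Int × Int))
  | [], _, _ => []
  | e :: t, q, n => if (e.1, e.2.1) = q then (e.1, e.2.1, PySem.Set.add e.2.2 n) :: t else e :: modifyAdd t q n

-- 'if (n_height := heights.get(n)) is not None: if n_height <= p_height + 1: neighbors[p].add(n)'
def addIfOk (heights : List (Int × Int × Int)) (h : Int) (p : Int × Int)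
    (nb : List (Int × Int × List (Int × Int))) (n : Int × Int) : List (Int × Int × List (Int × Int)) :=
  match hget heights n with
  | some nh => if nh ≤ h + 1 then modifyAdd nb p n else nb
  | none => nb

def neighbor_points (p : Int × Int) : List (Int × Int) :=
  [(p.1 + 1, p.2), (p.1 - 1, p.2), (p.1, p.2 + 1), (p.1, p.2 - 1)]

def make_neighbors (heights : List (Int × Int × Int)) : List (Int × Int × List (Int × Int)) :=
  heights.foldl
    (fun nb e => (neighbor_points (e.1, e.2.1)).foldl (addIfOk heights e.2.2 (e.1, e.2.1)) nb)
    (dictInit heights)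

-- ===== PORT B =====
-- direction tables: dicts Point -> Point (lookup = first match, assignment = overwrite or append)
def pget : List ((Int × Int) × (Int × Int)) → (Int × Int) → Option (Int × Int)
  | [], _ => none
  | e :: t, q => if e.1 = q then some e.2 else pget t q

def passign : List ((Int × Int) × (Int × Int)) → (Int × Int) → (Int × Int) → List ((Int × Int) × (Int × Int))
  | [], q, v => [(q, v)]
  | e :: t, q, v => if e.1 = q then (q, v) :: t else e :: passign t q v

-- one iteration of _scan_edges' loop: probe right and up neighbour, record both directed edges
def scanStep (heights : List (Int × Int × Int))
    (st : List ((Int × Int) × (Int × Int)) × List ((Int × Int) × (Int × Int)) ×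
          List ((Int × Int) × (Int × Int)) × List ((Int × Int) × (Int × Int)))
    (e : Int × Int × Int) :
    List ((Int × Int) × (Int × Int)) × List ((Int × Int) × (Int × Int)) ×
    List ((Int × Int) × (Int × Int)) × List ((Int × Int) × (Int × Int)) :=
  let x := e.1; let y := e.2.1; let h := e.2.2
  let (r, l, u, d) := st
  let (r, l) :=
    match hget heights (x + 1, y) with
    | some hn => (if hn ≤ h + 1 then passign r (x, y) (x + 1, y) else r,
                  if h ≤ hn + 1 then passign l (x + 1, y) (x, y) else l)
    | none => (r, l)
  let (u, d) :=
    match hget heights (x, y + 1) with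
    | some hn => (if hn ≤ h + 1 then passign u (x, y) (x, y + 1) else u,
                  if h ≤ hn + 1 then passign d (x, y + 1) (x, y) else d)
    | none => (u, d)
  (r, l, u, d)

-- the inner 'for d in (right, left, up, down): …' loop building one point's set
def collectB (ds : List (List ((Int × Int) × (Int × Int)))) (p : Int × Int) : List (Int × Int) :=
  ds.foldl (fun s dd => match pget dd p with | some n => PySem.Set.add s n | none => s) []

-- result[p] = s (overwrite or append)
def upsertRes : List (Int × Int × List (Int × Int)) → (Int × Int) → List (Int × Int) → List (Int × Int × List (Int × Int))
  | [], q, v => [(q.1, q.2, v)]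
  | e :: t, q, v => if (e.1, e.2.1) = q then (q.1, q.2, v) :: t else e :: upsertRes t q v

def make_neighbors_alt (heights : List (Int × Int × Int)) : List (Int × Int × List (Int × Int)) :=
  let (r, l, u, d) := heights.foldl (scanStep heights) ([], [], [], [])
  heights.foldl (fun res e => upsertRes res (e.1, e.2.1) (collectB [r, l, u, d] (e.1, e.2.1))) []

-- ===== PRECONDITION & SPEC =====
-- Pre_ excludes association lists with duplicate (x,y) keys: a Python dict cannot hold two
-- entries with the same key, so such lists do not determine a unique dict input.
def Pre_make_neighbors (heights : List (Int × Int × Int)) : Prop :=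
  (heights.map (fun e => (e.1, e.2.1))).Nodup
instance (heights : List (Int × Int × Int)) : Decidable (Pre_make_neighbors heights) := by
  unfold Pre_make_neighbors; infer_instance

def pvWitness_make_neighbors : (List (Int × Int × Int)) :=
  [(0, 0, 0), (1, 0, 1), (0, 1, 3), (1, 1, 2)]

def Spec_make_neighbors (heights : List (Int × Int × Int)) (out : List (Int × Int × List (Int × Int))) : Prop := out = make_neighbors_alt heights
instance (heights : List (Int × Int × Int)) (out : List (Int × Int × List (Int × Int))) : Decidable (Spec_make_neighbors heights out) := by unfold Spec_make_neighbors; infer_instance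

-- ===== CLAIM (what is proved, stated in full; the proofs are below) =====
def Claim_equal_make_neighbors : Prop := ∀ (heights : List (Int × Int × Int)), Dom_make_neighbors heights → Pre_make_neighbors heights → Spec_make_neighbors heights (make_neighbors heights)

-- ===== LEMMAS AND PROOFS =====

def keyOf {A : Type} (e : Int × Int × A) : Int × Int := (e.1, e.2.1)

def okB (heights : List (Int × Int × Int)) (h : Int) (n : Int × Int) : Bool :=
  match hget heights n with
  | some nh => decide (nh ≤ h + 1)
  | none => false

def bwdB (heights : List (Int × Int × Int)) (h : Int) (n : Int × Int) : Bool :=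
  match hget heights n with
  | some nh => decide (h ≤ nh + 1)
  | none => false

-- the four direction tables as filterMaps over the input
def fR (heights : List (Int × Int × Int)) (e : Int × Int × Int) : Option ((Int × Int) × (Int × Int)) :=
  if okB heights e.2.2 (e.1 + 1, e.2.1) then some ((e.1, e.2.1), (e.1 + 1, e.2.1)) else none
def fL (heights : List (Int × Int × Int)) (e : Int × Int × Int) : Option ((Int × Int) × (Int × Int)) :=
  if bwdB heights e.2.2 (e.1 + 1, e.2.1) then some ((e.1 + 1, e.2.1), (e.1, e.2.1)) else none
def fU (heights : List (Int × Int × Int)) (e : Int × Int × Int) : Option ((Int × Int) × (Int × Int)) :=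
  if okB heights e.2.2 (e.1, e.2.1 + 1) then some ((e.1, e.2.1), (e.1, e.2.1 + 1)) else none
def fD (heights : List (Int × Int × Int)) (e : Int × Int × Int) : Option ((Int × Int) × (Int × Int)) :=
  if bwdB heights e.2.2 (e.1, e.2.1 + 1) then some ((e.1, e.2.1 + 1), (e.1, e.2.1)) else none

theorem set_add_not_mem {s : List (Int × Int)} {n : Int × Int} (hn : n ∉ s) :
    PySem.Set.add s n = s ++ [n] := by
  simp [PySem.Set.add, hn]

theorem modifyAdd_split (L1 L2 : List (Int × Int × List (Int × Int))) (q : Int × Int)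
    (s : List (Int × Int)) (n : Int × Int) (hq : q ∉ L1.map keyOf) :
    modifyAdd (L1 ++ (q.1, q.2, s) :: L2) q n = L1 ++ (q.1, q.2, PySem.Set.add s n) :: L2 := by
  induction L1 with
  | nil => simp [modifyAdd]
  | cons e t ih =>
    simp only [List.map_cons, List.mem_cons, not_or, keyOf] at hq
    have hq1 : ¬((e.1, e.2.1) = q) := fun hcc => hq.1 hcc.symm
    simp [modifyAdd, hq1, ih hq.2]

theorem addIfOk_split (heights : List (Int × Int × Int)) (h : Int)
    (L1 L2 : List (Int × Int × List (Int × Int))) (q : Int × Int)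
    (s : List (Int × Int)) (n : Int × Int) (hq : q ∉ L1.map keyOf) (hn : n ∉ s) :
    addIfOk heights h q (L1 ++ (q.1, q.2, s) :: L2) n
      = L1 ++ (q.1, q.2, s ++ if okB heights h n then [n] else []) :: L2 := by
  cases hO : hget heights n with
  | none => simp [addIfOk, okB, hO]
  | some nh =>
    by_cases hle : nh ≤ h + 1 <;>
      simp [addIfOk, okB, hO, hle, modifyAdd_split L1 L2 q s n hq, set_add_not_mem hn]

theorem foldl_addIfOk (heights : List (Int × Int × Int)) (h : Int)
    (L1 L2 : List (Int × Int × List (Int × Int))) (q : Int × Int) (hq : q ∉ L1.map keyOf) :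
    ∀ (cs : List (Int × Int)) (s : List (Int × Int)), cs.Nodup → (∀ c ∈ cs, c ∉ s) →
    cs.foldl (addIfOk heights h q) (L1 ++ (q.1, q.2, s) :: L2)
      = L1 ++ (q.1, q.2, s ++ cs.filter (okB heights h)) :: L2 := by
  intro cs
  induction cs with
  | nil => intro s _ _; simp
  | cons c cs ih =>
    intro s hnd hni
    rw [List.foldl_cons, addIfOk_split heights h L1 L2 q s c hq (hni c (by simp))]
    have hnotc : ∀ c' ∈ cs, c' ≠ c := fun c' hc' => by
      intro hcc; exact (List.nodup_cons.mp hnd).1 (hcc ▸ hc')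
    by_cases hok : okB heights h c
    · rw [if_pos hok,
        ih (s ++ [c]) (List.nodup_cons.mp hnd).2
          (fun c' hc' => by
            simp only [List.mem_append, List.mem_singleton, not_or]
            exact ⟨hni c' (List.mem_cons_of_mem _ hc'), hnotc c' hc'⟩)]
      simp [hok]
    · rw [if_neg hok, List.append_nil,
        ih s (List.nodup_cons.mp hnd).2
          (fun c' hc' => hni c' (List.mem_cons_of_mem _ hc'))]
      simp [hok]

theorem dinsert_notmem (acc : List (Int × Int × List (Int × Int))) (q : Int × Int)
    (hq : q ∉ acc.map keyOf) : dinsert acc q = acc ++ [(q.1, q.2, [])] := by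
  induction acc with
  | nil => simp [dinsert]
  | cons e t ih =>
    simp only [List.map_cons, List.mem_cons, not_or, keyOf] at hq
    have hq1 : ¬((e.1, e.2.1) = q) := fun hcc => hq.1 hcc.symm
    simp [dinsert, hq1, ih hq.2]

theorem dictInit_go (hs : List (Int × Int × Int)) :
    ∀ (acc : List (Int × Int × List (Int × Int))),
    (∀ e ∈ hs, keyOf e ∉ acc.map keyOf) → (hs.map keyOf).Nodup →
    hs.foldl (fun d e => dinsert d (e.1, e.2.1)) acc
      = acc ++ hs.map (fun e => (e.1, e.2.1, ([] : List (Int × Int)))) := by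
  induction hs with
  | nil => intro acc _ _; simp
  | cons e t ih =>
    intro acc hacc hnd
    rw [List.map_cons] at hnd
    have h1 : keyOf e ∉ t.map keyOf := (List.nodup_cons.mp hnd).1
    have h2 : (t.map keyOf).Nodup := (List.nodup_cons.mp hnd).2
    rw [List.foldl_cons, dinsert_notmem acc (e.1, e.2.1) (hacc e (by simp))]
    rw [ih (acc ++ [(e.1, e.2.1, [])]) ?_ h2]
    · simp
    · intro e' he'
      simp only [List.map_append, List.mem_append, not_or]
      refine ⟨hacc e' (List.mem_cons_of_mem _ he'), ?_⟩
      simp only [List.map_cons, List.map_nil, List.mem_singleton]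
      intro hkk
      have heq : keyOf e' = keyOf e := by simpa [keyOf] using hkk
      have hm : keyOf e' ∈ t.map keyOf := List.mem_map_of_mem he'
      rw [heq] at hm
      exact h1 hm

theorem dictInit_eq (heights : List (Int × Int × Int)) (hN : (heights.map keyOf).Nodup) :
    dictInit heights = heights.map (fun e => (e.1, e.2.1, ([] : List (Int × Int)))) := by
  simpa using dictInit_go heights [] (by simp) hN

theorem neighbor_points_nodup (p : Int × Int) : (neighbor_points p).Nodup := by
  simp [neighbor_points, Prod.ext_iff]
  omega

theorem key_not_mem_of_middle {A : Type} (pre post : List (Int × Int × Int))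
    (e : Int × Int × Int) (hN : ((pre ++ e :: post).map keyOf).Nodup)
    (f : Int × Int × Int → Int × Int × A) (hf : ∀ x, keyOf (f x) = keyOf x) :
    (e.1, e.2.1) ∉ (pre.map f).map keyOf := by
  intro hmem
  rw [List.map_map, show (keyOf ∘ f) = keyOf from funext hf] at hmem
  rw [List.map_append] at hN
  have hdisj := (List.nodup_append.mp hN).2.2
  exact hdisj _ hmem (keyOf e) (by simp) rfl

theorem fA_outer (heights : List (Int × Int × Int)) :
    ∀ (post pre : List (Int × Int × Int)), ((pre ++ post).map keyOf).Nodup →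
    post.foldl (fun nb e => (neighbor_points (e.1, e.2.1)).foldl (addIfOk heights e.2.2 (e.1, e.2.1)) nb)
      (pre.map (fun e => (e.1, e.2.1, (neighbor_points (e.1, e.2.1)).filter (okB heights e.2.2)))
        ++ post.map (fun e => (e.1, e.2.1, ([] : List (Int × Int)))))
      = (pre ++ post).map (fun e => (e.1, e.2.1, (neighbor_points (e.1, e.2.1)).filter (okB heights e.2.2))) := by
  intro post
  induction post with
  | nil => intro pre _; simp
  | cons e t ih =>
    intro pre hN
    rw [List.foldl_cons, List.map_cons]
    have hq := key_not_mem_of_middle pre t e hN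
      (fun e => (e.1, e.2.1, (neighbor_points (e.1, e.2.1)).filter (okB heights e.2.2)))
      (fun x => rfl)
    rw [foldl_addIfOk heights e.2.2 _ _ (e.1, e.2.1) hq (neighbor_points (e.1, e.2.1)) []
        (neighbor_points_nodup _) (by simp)]
    have hstep : (pre.map (fun e => (e.1, e.2.1, (neighbor_points (e.1, e.2.1)).filter (okB heights e.2.2)))
          ++ ((e.1, e.2.1).1, (e.1, e.2.1).2, [] ++ (neighbor_points (e.1, e.2.1)).filter (okB heights e.2.2)) :: t.map (fun e => (e.1, e.2.1, ([] : List (Int × Int)))))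
        = ((pre ++ [e]).map (fun e => (e.1, e.2.1, (neighbor_points (e.1, e.2.1)).filter (okB heights e.2.2)))
          ++ t.map (fun e => (e.1, e.2.1, ([] : List (Int × Int))))) := by
      simp
    rw [hstep, ih (pre ++ [e]) (by simpa using hN), List.append_assoc]
    simp

-- ---- B-side lemmas ----

theorem passign_fresh (d : List ((Int × Int) × (Int × Int))) (k v : Int × Int)
    (hk : k ∉ d.map Prod.fst) : passign d k v = d ++ [(k, v)] := by
  induction d with
  | nil => simp [passign]
  | cons e t ih =>
    simp only [List.map_cons, List.mem_cons, not_or] at hk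
    have : ¬(e.1 = k) := fun hcc => hk.1 hcc.symm
    simp [passign, this, ih hk.2]

theorem keys_filterMap (hs : List (Int × Int × Int)) (g : Int × Int × Int → Option ((Int × Int) × (Int × Int)))
    (σ : (Int × Int) → (Int × Int)) (hg : ∀ e kv, g e = some kv → kv.1 = σ (keyOf e)) :
    ∀ k ∈ (hs.filterMap g).map Prod.fst, ∃ k' ∈ hs.map keyOf, k = σ k' := by
  intro k hk
  simp only [List.mem_map, List.mem_filterMap] at hk
  obtain ⟨kv, ⟨e, he, hge⟩, hfst⟩ := hk
  exact ⟨keyOf e, List.mem_map_of_mem he, by rw [← hfst, hg e kv hge]⟩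

theorem pget_none (d : List ((Int × Int) × (Int × Int))) (q : Int × Int)
    (h : ∀ k ∈ d.map Prod.fst, k ≠ q) : pget d q = none := by
  induction d with
  | nil => simp [pget]
  | cons e t ih =>
    have h1 : e.1 ≠ q := h e.1 (by simp)
    simp only [pget, if_neg h1]
    exact ih fun k hk => h k (by simp [hk])

theorem pget_filterMap (σ : (Int × Int) → (Int × Int)) (g : Int × Int × Int → Option ((Int × Int) × (Int × Int)))
    (hσ : ∀ a b, σ a = σ b → a = b) (hg : ∀ e kv, g e = some kv → kv.1 = σ (keyOf e)) :
    ∀ (hs : List (Int × Int × Int)) (k : Int × Int), (hs.map keyOf).Nodup →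
    pget (hs.filterMap g) (σ k)
      = (hs.find? (fun e => decide (keyOf e = k))).bind (fun e => (g e).map Prod.snd) := by
  intro hs
  induction hs with
  | nil => intro k _; simp [pget]
  | cons e t ih =>
    intro k hnd
    rw [List.map_cons, List.nodup_cons] at hnd
    by_cases hke : keyOf e = k
    · rw [List.find?_cons_of_pos (by simp [hke])]
      cases hge : g e with
      | none =>
        simp only [List.filterMap_cons, hge, Option.bind_some, Option.map_none]
        apply pget_none
        intro k' hk'
        obtain ⟨k'', hk'', hkk⟩ := keys_filterMap t g σ hg k' hk'
        intro hcc
        have : k'' = k := hσ k'' k (by rw [← hkk, hcc])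
        rw [this, ← hke] at hk''
        exact hnd.1 hk''
      | some kv =>
        have hkey : kv.1 = σ k := by rw [hg e kv hge, hke]
        obtain ⟨kv1, kv2⟩ := kv
        simp only at hkey
        simp [hge, pget, hkey]
    · rw [List.find?_cons_of_neg (by simp [hke])]
      cases hge : g e with
      | none => simp only [List.filterMap_cons, hge]; exact ih k hnd.2
      | some kv =>
        have hkey : kv.1 = σ (keyOf e) := hg e kv hge
        have hne : kv.1 ≠ σ k := by
          rw [hkey]; intro hcc; exact hke (hσ _ _ hcc)
        simp only [List.filterMap_cons, hge, pget, if_neg hne]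
        exact ih k hnd.2

theorem hget_eq_find? (hs : List (Int × Int × Int)) (q : Int × Int) :
    hget hs q = (hs.find? (fun e => decide (keyOf e = q))).map (fun e => e.2.2) := by
  induction hs with
  | nil => simp [hget]
  | cons e t ih =>
    by_cases hk : keyOf e = q
    · rw [List.find?_cons_of_pos (by simp [hk])]
      simp [hget, keyOf] at hk ⊢
      simp [hk]
    · rw [List.find?_cons_of_neg (by simp [hk])]
      have : ¬((e.1, e.2.1) = q) := hk
      simp [hget, this, ih]

theorem find?_key_self (hs : List (Int × Int × Int)) (e : Int × Int × Int)
    (he : e ∈ hs) (hnd : (hs.map keyOf).Nodup) :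
    hs.find? (fun e' => decide (keyOf e' = keyOf e)) = some e := by
  induction hs with
  | nil => cases he
  | cons a t ih =>
    rw [List.map_cons, List.nodup_cons] at hnd
    rcases List.mem_cons.mp he with rfl | hmem
    · exact List.find?_cons_of_pos (by simp)
    · by_cases hk : keyOf a = keyOf e
      · exfalso
        exact hnd.1 (hk ▸ List.mem_map_of_mem hmem)
      · rw [List.find?_cons_of_neg (by simp [hk])]
        exact ih hmem hnd.2

theorem hget_key_self (hs : List (Int × Int × Int)) (e : Int × Int × Int)
    (he : e ∈ hs) (hnd : (hs.map keyOf).Nodup) :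
    hget hs (keyOf e) = some e.2.2 := by
  rw [hget_eq_find?, find?_key_self hs e he hnd]; rfl

-- one scan step turns the prefix tables into the tables of the extended prefix
theorem scanStep_eq (heights : List (Int × Int × Int)) (pre : List (Int × Int × Int))
    (e : Int × Int × Int) (hNe : keyOf e ∉ pre.map keyOf) :
    scanStep heights
      (pre.filterMap (fR heights), pre.filterMap (fL heights),
       pre.filterMap (fU heights), pre.filterMap (fD heights)) e
      = ((pre ++ [e]).filterMap (fR heights), (pre ++ [e]).filterMap (fL heights),
         (pre ++ [e]).filterMap (fU heights), (pre ++ [e]).filterMap (fD heights)) := by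
  have hfreshR : (e.1, e.2.1) ∉ (pre.filterMap (fR heights)).map Prod.fst := by
    intro hmem
    obtain ⟨k', hk', hkk⟩ := keys_filterMap pre (fR heights) id (by
      intro e' kv hkv; simp only [fR] at hkv; split at hkv
      · exact (Option.some.injEq _ _ ▸ hkv) ▸ rfl
      · cases hkv) _ hmem
    exact hNe (by rw [show (keyOf e : Int × Int) = k' from hkk]; exact hk')
  have hfreshU : (e.1, e.2.1) ∉ (pre.filterMap (fU heights)).map Prod.fst := by
    intro hmem
    obtain ⟨k', hk', hkk⟩ := keys_filterMap pre (fU heights) id (by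
      intro e' kv hkv; simp only [fU] at hkv; split at hkv
      · exact (Option.some.injEq _ _ ▸ hkv) ▸ rfl
      · cases hkv) _ hmem
    exact hNe (by rw [show (keyOf e : Int × Int) = k' from hkk]; exact hk')
  have hfreshL : (e.1 + 1, e.2.1) ∉ (pre.filterMap (fL heights)).map Prod.fst := by
    intro hmem
    obtain ⟨k', hk', hkk⟩ := keys_filterMap pre (fL heights) (fun k => (k.1 + 1, k.2)) (by
      intro e' kv hkv; simp only [fL] at hkv; split at hkv
      · exact (Option.some.injEq _ _ ▸ hkv) ▸ rfl
      · cases hkv) _ hmem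
    have hk : (keyOf e : Int × Int) = k' := by
      obtain ⟨a, b⟩ := k'; simp only [keyOf, Prod.mk.injEq] at hkk ⊢; omega
    exact hNe (by rw [hk]; exact hk')
  have hfreshD : (e.1, e.2.1 + 1) ∉ (pre.filterMap (fD heights)).map Prod.fst := by
    intro hmem
    obtain ⟨k', hk', hkk⟩ := keys_filterMap pre (fD heights) (fun k => (k.1, k.2 + 1)) (by
      intro e' kv hkv; simp only [fD] at hkv; split at hkv
      · exact (Option.some.injEq _ _ ▸ hkv) ▸ rfl
      · cases hkv) _ hmem
    have hk : (keyOf e : Int × Int) = k' := by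
      obtain ⟨a, b⟩ := k'; simp only [keyOf, Prod.mk.injEq] at hkk ⊢; omega
    exact hNe (by rw [hk]; exact hk')
  have eRs : List.filterMap (fR heights) [e]
      = if okB heights e.2.2 (e.1 + 1, e.2.1) then [((e.1, e.2.1), (e.1 + 1, e.2.1))] else [] := by
    by_cases hok : okB heights e.2.2 (e.1 + 1, e.2.1) <;> simp [fR, hok]
  have eLs : List.filterMap (fL heights) [e]
      = if bwdB heights e.2.2 (e.1 + 1, e.2.1) then [((e.1 + 1, e.2.1), (e.1, e.2.1))] else [] := by
    by_cases hok : bwdB heights e.2.2 (e.1 + 1, e.2.1) <;> simp [fL, hok]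
  have eUs : List.filterMap (fU heights) [e]
      = if okB heights e.2.2 (e.1, e.2.1 + 1) then [((e.1, e.2.1), (e.1, e.2.1 + 1))] else [] := by
    by_cases hok : okB heights e.2.2 (e.1, e.2.1 + 1) <;> simp [fU, hok]
  have eDs : List.filterMap (fD heights) [e]
      = if bwdB heights e.2.2 (e.1, e.2.1 + 1) then [((e.1, e.2.1 + 1), (e.1, e.2.1))] else [] := by
    by_cases hok : bwdB heights e.2.2 (e.1, e.2.1 + 1) <;> simp [fD, hok]
  rw [List.filterMap_append, List.filterMap_append, List.filterMap_append, List.filterMap_append,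
    eRs, eLs, eUs, eDs]
  cases h1 : hget heights (e.1 + 1, e.2.1) with
  | none =>
    cases h2 : hget heights (e.1, e.2.1 + 1) with
    | none => simp [scanStep, okB, bwdB, h1, h2]
    | some hn2 =>
      by_cases hu : hn2 ≤ e.2.2 + 1 <;> by_cases hd : e.2.2 ≤ hn2 + 1 <;>
        simp [scanStep, okB, bwdB, h1, h2, hu, hd,
          passign_fresh _ _ _ hfreshU, passign_fresh _ _ _ hfreshD]
  | some hn1 =>
    cases h2 : hget heights (e.1, e.2.1 + 1) with
    | none =>
      by_cases hr : hn1 ≤ e.2.2 + 1 <;> by_cases hl : e.2.2 ≤ hn1 + 1 <;>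
        simp [scanStep, okB, bwdB, h1, h2, hr, hl,
          passign_fresh _ _ _ hfreshR, passign_fresh _ _ _ hfreshL]
    | some hn2 =>
      by_cases hr : hn1 ≤ e.2.2 + 1 <;> by_cases hl : e.2.2 ≤ hn1 + 1 <;>
      by_cases hu : hn2 ≤ e.2.2 + 1 <;> by_cases hd : e.2.2 ≤ hn2 + 1 <;>
        simp [scanStep, okB, bwdB, h1, h2, hr, hl, hu, hd,
          passign_fresh _ _ _ hfreshR, passign_fresh _ _ _ hfreshL,
          passign_fresh _ _ _ hfreshU, passign_fresh _ _ _ hfreshD]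

theorem scan_go (heights : List (Int × Int × Int)) :
    ∀ (post pre : List (Int × Int × Int)), ((pre ++ post).map keyOf).Nodup →
    post.foldl (scanStep heights)
      (pre.filterMap (fR heights), pre.filterMap (fL heights),
       pre.filterMap (fU heights), pre.filterMap (fD heights))
      = ((pre ++ post).filterMap (fR heights), (pre ++ post).filterMap (fL heights),
         (pre ++ post).filterMap (fU heights), (pre ++ post).filterMap (fD heights)) := by
  intro post
  induction post with
  | nil => intro pre _; simp
  | cons e t ih =>
    intro pre hN
    have hNe : keyOf e ∉ pre.map keyOf := by
      intro hmem
      rw [List.map_append] at hN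
      exact (List.nodup_append.mp hN).2.2 _ hmem (keyOf e) (by simp) rfl
    rw [List.foldl_cons, scanStep_eq heights pre e hNe, ih (pre ++ [e]) (by simpa using hN)]
    simp

theorem scan_eq (heights : List (Int × Int × Int)) (hN : (heights.map keyOf).Nodup) :
    heights.foldl (scanStep heights) ([], [], [], [])
      = (heights.filterMap (fR heights), heights.filterMap (fL heights),
         heights.filterMap (fU heights), heights.filterMap (fD heights)) := by
  simpa using scan_go heights heights [] (by simpa using hN)

theorem upsertRes_notmem (acc : List (Int × Int × List (Int × Int))) (q : Int × Int)
    (v : List (Int × Int)) (hq : q ∉ acc.map keyOf) : upsertRes acc q v = acc ++ [(q.1, q.2, v)] := by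
  induction acc with
  | nil => simp [upsertRes]
  | cons e t ih =>
    simp only [List.map_cons, List.mem_cons, not_or, keyOf] at hq
    have hq1 : ¬((e.1, e.2.1) = q) := fun hcc => hq.1 hcc.symm
    simp [upsertRes, hq1, ih hq.2]

theorem resFold_go (v : (Int × Int × Int) → List (Int × Int)) (hs : List (Int × Int × Int)) :
    ∀ (acc : List (Int × Int × List (Int × Int))),
    (∀ e ∈ hs, keyOf e ∉ acc.map keyOf) → (hs.map keyOf).Nodup →
    hs.foldl (fun res e => upsertRes res (e.1, e.2.1) (v e)) acc
      = acc ++ hs.map (fun e => (e.1, e.2.1, v e)) := by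
  induction hs with
  | nil => intro acc _ _; simp
  | cons e t ih =>
    intro acc hacc hnd
    rw [List.map_cons] at hnd
    have h1 : keyOf e ∉ t.map keyOf := (List.nodup_cons.mp hnd).1
    have h2 : (t.map keyOf).Nodup := (List.nodup_cons.mp hnd).2
    rw [List.foldl_cons, upsertRes_notmem acc (e.1, e.2.1) (v e) (hacc e (by simp))]
    rw [ih (acc ++ [(e.1, e.2.1, v e)]) ?_ h2]
    · simp
    · intro e' he'
      simp only [List.map_append, List.mem_append, not_or]
      refine ⟨hacc e' (List.mem_cons_of_mem _ he'), ?_⟩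
      simp only [List.map_cons, List.map_nil, List.mem_singleton]
      intro hkk
      have heq : keyOf e' = keyOf e := by simpa [keyOf] using hkk
      have hm : keyOf e' ∈ t.map keyOf := List.mem_map_of_mem he'
      rw [heq] at hm
      exact h1 hm

-- the four table lookups at a point of the grid
theorem pget_R (heights : List (Int × Int × Int)) (e : Int × Int × Int)
    (he : e ∈ heights) (hN : (heights.map keyOf).Nodup) :
    pget (heights.filterMap (fR heights)) (e.1, e.2.1)
      = if okB heights e.2.2 (e.1 + 1, e.2.1) then some (e.1 + 1, e.2.1) else none := by
  have hmain := pget_filterMap id (fR heights) (fun a b h => h) (by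
      intro e' kv hkv; simp only [fR] at hkv; split at hkv
      · exact (Option.some.injEq _ _ ▸ hkv) ▸ rfl
      · cases hkv) heights (keyOf e) hN
  simp only [id_eq] at hmain
  rw [show ((e.1, e.2.1) : Int × Int) = keyOf e from rfl, hmain,
    find?_key_self heights e he hN]
  simp only [Option.bind_some, fR]
  split <;> rfl

theorem pget_U (heights : List (Int × Int × Int)) (e : Int × Int × Int)
    (he : e ∈ heights) (hN : (heights.map keyOf).Nodup) :
    pget (heights.filterMap (fU heights)) (e.1, e.2.1)
      = if okB heights e.2.2 (e.1, e.2.1 + 1) then some (e.1, e.2.1 + 1) else none := by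
  have hmain := pget_filterMap id (fU heights) (fun a b h => h) (by
      intro e' kv hkv; simp only [fU] at hkv; split at hkv
      · exact (Option.some.injEq _ _ ▸ hkv) ▸ rfl
      · cases hkv) heights (keyOf e) hN
  simp only [id_eq] at hmain
  rw [show ((e.1, e.2.1) : Int × Int) = keyOf e from rfl, hmain,
    find?_key_self heights e he hN]
  simp only [Option.bind_some, fU]
  split <;> rfl

theorem pget_L (heights : List (Int × Int × Int)) (e : Int × Int × Int)
    (he : e ∈ heights) (hN : (heights.map keyOf).Nodup) :
    pget (heights.filterMap (fL heights)) (e.1, e.2.1)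
      = if okB heights e.2.2 (e.1 - 1, e.2.1) then some (e.1 - 1, e.2.1) else none := by
  have hσ : ∀ a b : Int × Int, ((a.1 + 1, a.2) : Int × Int) = (b.1 + 1, b.2) → a = b := by
    intro a b h; obtain ⟨a1, a2⟩ := a; obtain ⟨b1, b2⟩ := b
    simp only [Prod.mk.injEq] at h ⊢; omega
  have hmain := pget_filterMap (fun k => (k.1 + 1, k.2)) (fL heights) hσ (by
      intro e' kv hkv; simp only [fL] at hkv; split at hkv
      · exact (Option.some.injEq _ _ ▸ hkv) ▸ rfl
      · cases hkv) heights (e.1 - 1, e.2.1) hN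
  simp only at hmain
  rw [show ((e.1 - 1 + 1, e.2.1) : Int × Int) = (e.1, e.2.1) from by simp] at hmain
  rw [hmain]
  cases hF : heights.find? (fun e' => decide (keyOf e' = ((e.1 - 1, e.2.1) : Int × Int))) with
  | none =>
    have hgn : hget heights (e.1 - 1, e.2.1) = none := by
      rw [hget_eq_find?, hF]; rfl
    simp [okB, hgn]
  | some e' =>
    have hke' : keyOf e' = ((e.1 - 1, e.2.1) : Int × Int) := by
      have := List.find?_some hF; simpa using this
    have hgs : hget heights (e.1 - 1, e.2.1) = some e'.2.2 := by
      rw [hget_eq_find?, hF]; rfl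
    have hself : hget heights (e'.1 + 1, e'.2.1) = some e.2.2 := by
      have h1 : ((e'.1 + 1, e'.2.1) : Int × Int) = (e.1, e.2.1) := by
        simp only [keyOf, Prod.mk.injEq] at hke'
        simp only [Prod.mk.injEq]; omega
      rw [h1]; exact hget_key_self heights e he hN
    simp only [Option.bind_some, fL, bwdB, hself, okB, hgs]
    have hval : ((e'.1, e'.2.1) : Int × Int) = (e.1 - 1, e.2.1) := hke'
    by_cases hc : e'.2.2 ≤ e.2.2 + 1 <;> simp [hc, hval]

theorem pget_D (heights : List (Int × Int × Int)) (e : Int × Int × Int)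
    (he : e ∈ heights) (hN : (heights.map keyOf).Nodup) :
    pget (heights.filterMap (fD heights)) (e.1, e.2.1)
      = if okB heights e.2.2 (e.1, e.2.1 - 1) then some (e.1, e.2.1 - 1) else none := by
  have hσ : ∀ a b : Int × Int, ((a.1, a.2 + 1) : Int × Int) = (b.1, b.2 + 1) → a = b := by
    intro a b h; obtain ⟨a1, a2⟩ := a; obtain ⟨b1, b2⟩ := b
    simp only [Prod.mk.injEq] at h ⊢; omega
  have hmain := pget_filterMap (fun k => (k.1, k.2 + 1)) (fD heights) hσ (by
      intro e' kv hkv; simp only [fD] at hkv; split at hkv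
      · exact (Option.some.injEq _ _ ▸ hkv) ▸ rfl
      · cases hkv) heights (e.1, e.2.1 - 1) hN
  simp only at hmain
  rw [show ((e.1, e.2.1 - 1 + 1) : Int × Int) = (e.1, e.2.1) from by simp] at hmain
  rw [hmain]
  cases hF : heights.find? (fun e' => decide (keyOf e' = ((e.1, e.2.1 - 1) : Int × Int))) with
  | none =>
    have hgn : hget heights (e.1, e.2.1 - 1) = none := by
      rw [hget_eq_find?, hF]; rfl
    simp [okB, hgn]
  | some e' =>
    have hke' : keyOf e' = ((e.1, e.2.1 - 1) : Int × Int) := by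
      have := List.find?_some hF; simpa using this
    have hgs : hget heights (e.1, e.2.1 - 1) = some e'.2.2 := by
      rw [hget_eq_find?, hF]; rfl
    have hself : hget heights (e'.1, e'.2.1 + 1) = some e.2.2 := by
      have h1 : ((e'.1, e'.2.1 + 1) : Int × Int) = (e.1, e.2.1) := by
        simp only [keyOf, Prod.mk.injEq] at hke'
        simp only [Prod.mk.injEq]; omega
      rw [h1]; exact hget_key_self heights e he hN
    simp only [Option.bind_some, fD, bwdB, hself, okB, hgs]
    have hval : ((e'.1, e'.2.1) : Int × Int) = (e.1, e.2.1 - 1) := hke'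
    by_cases hc : e'.2.2 ≤ e.2.2 + 1 <;> simp [hc, hval]

-- folding conditional Set.add over distinct candidates = append of the filtered list
theorem foldl_filter_add (ok : (Int × Int) → Bool) :
    ∀ (cs : List (Int × Int)) (s : List (Int × Int)), cs.Nodup → (∀ c ∈ cs, c ∉ s) →
    cs.foldl (fun s c => if ok c then PySem.Set.add s c else s) s = s ++ cs.filter ok := by
  intro cs
  induction cs with
  | nil => intro s _ _; simp
  | cons c cs ih =>
    intro s hnd hni
    have hnotc : ∀ c' ∈ cs, c' ≠ c := fun c' hc' hcc =>
      (List.nodup_cons.mp hnd).1 (hcc ▸ hc')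
    rw [List.foldl_cons]
    by_cases hok : ok c
    · rw [if_pos hok, set_add_not_mem (hni c (by simp)),
        ih (s ++ [c]) (List.nodup_cons.mp hnd).2
          (fun c' hc' => by
            simp only [List.mem_append, List.mem_singleton, not_or]
            exact ⟨hni c' (List.mem_cons_of_mem _ hc'), hnotc c' hc'⟩)]
      simp [hok]
    · rw [if_neg hok,
        ih s (List.nodup_cons.mp hnd).2
          (fun c' hc' => hni c' (List.mem_cons_of_mem _ hc'))]
      simp [hok]

-- the assembled set of one point equals A's filtered candidate list
theorem collect_eq (heights : List (Int × Int × Int)) (e : Int × Int × Int)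
    (he : e ∈ heights) (hN : (heights.map keyOf).Nodup) :
    collectB [heights.filterMap (fR heights), heights.filterMap (fL heights),
              heights.filterMap (fU heights), heights.filterMap (fD heights)] (e.1, e.2.1)
      = (neighbor_points (e.1, e.2.1)).filter (okB heights e.2.2) := by
  have step : ∀ (s : List (Int × Int)) (b : Bool) (c : Int × Int),
      (match (if b then some c else none : Option (Int × Int)) with
       | some n => PySem.Set.add s n
       | none => s) = if b then PySem.Set.add s c else s := by
    intro s b c; cases b <;> rfl
  simp only [collectB, List.foldl_cons, List.foldl_nil,
    pget_R heights e he hN, pget_L heights e he hN, pget_U heights e he hN,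
    pget_D heights e he hN, step]
  have := foldl_filter_add (okB heights e.2.2)
    [((e.1 : Int) + 1, (e.2.1 : Int)), (e.1 - 1, e.2.1), (e.1, e.2.1 + 1), (e.1, e.2.1 - 1)] []
    (by simp [Prod.ext_iff]; omega) (by simp)
  simp only [List.foldl_cons, List.foldl_nil] at this
  rw [this]
  rfl

-- ===== VERDICT (by name: the statement is the Claim_ definition above) =====
theorem make_neighbors_spec : Claim_equal_make_neighbors := by
  intro heights _ hPre
  have hN : (heights.map keyOf).Nodup := by simpa [keyOf] using hPre
  show make_neighbors heights = make_neighbors_alt heights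
  have hA : make_neighbors heights
      = heights.map (fun e => (e.1, e.2.1, (neighbor_points (e.1, e.2.1)).filter (okB heights e.2.2))) := by
    unfold make_neighbors
    rw [dictInit_eq heights hN]
    simpa using fA_outer heights heights [] (by simpa using hN)
  have hB : make_neighbors_alt heights
      = heights.map (fun e => (e.1, e.2.1,
          collectB [heights.filterMap (fR heights), heights.filterMap (fL heights),
                    heights.filterMap (fU heights), heights.filterMap (fD heights)] (e.1, e.2.1))) := by
    unfold make_neighbors_alt
    rw [scan_eq heights hN]
    simpa using resFold_go
      (fun e => collectB [heights.filterMap (fR heights), heights.filterMap (fL heights),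
                          heights.filterMap (fU heights), heights.filterMap (fD heights)] (e.1, e.2.1))
      heights [] (by simp) hN
  rw [hA, hB]
  exact (List.map_congr_left (fun e he => by rw [collect_eq heights e he hN])).symm
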